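-- pv_equiv track=rewrite | github.com/YH-edenbro/SSAFY_APS | py/programers_phone.py | solution
-- ===== SOURCE A (Python) =====
-- def solution(numbers, hand):
--     cur = ['*', '#']
--
--     answer = ''
--
--     for num in numbers:
--         if num in [1, 4, 7]:
--             answer += 'L'
--             cur[0] = num
--             continue
--
--         if num in [3, 6, 9]:
--             answer += 'R'
--             cur[1] = num
--             continue
--
--         if num in [2, 5, 8, 0]:
--             left_hand = how_long(cur[0], num)
--             right_hand = how_long(cur[1], num)
--             if left_hand == right_hand:
--                 if hand == 'left':
--                     answer += 'L'
--                     cur[0] = num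
--                     continue
--                 else:
--                     answer += 'R'
--                     cur[1] = num
--                     continue
--             elif left_hand < right_hand:
--                 answer += 'L'
--                 cur[0] = num
--                 continue
--             else:
--                 answer += 'R'
--                 cur[1] = num
--                 continue
--
--     return answer
--
-- def how_long(s, g):
--
--     phone = [[1, 2, 3], [4, 5, 6], [7, 8, 9], ['*', 0, '#']]
--
--     s_ij = []
--
--     # 좌표 찾기
--     for i in range(4):
--         if len(s_ij) == 2:
--             break
--         for j in range(3):
--             if len(s_ij) == 2:
--                 break
--             if phone[i][j] == s:
--                 s_ij.append(i)
--                 s_ij.append(j)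
--     ans = 0
--     while s != g:
--         if s in [1, 4, 7, '*']:
--             s = phone[s_ij[0]][s_ij[1] + 1]
--             s_ij = [s_ij[0], s_ij[1] + 1]
--             ans += 1
--             continue
--
--         elif s in [3, 6, 9, '#']:
--             s = phone[s_ij[0]][s_ij[1] - 1]
--             s_ij = [s_ij[0], s_ij[1] - 1]
--             ans += 1
--             continue
--
--         if g == 0:
--             while s != 0:
--                 s = phone[s_ij[0]+1][s_ij[1]]
--                 s_ij = [s_ij[0]+1, s_ij[1]]
--                 ans += 1
--             return ans
--
--         if s == 0:
--             while s != g: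
--                 s = phone[s_ij[0] - 1][s_ij[1]]
--                 s_ij = [s_ij[0] - 1, s_ij[1]]
--                 ans += 1
--             return ans
--
--         if s > g:
--             s = phone[s_ij[0] - 1][s_ij[1]]
--             s_ij = [s_ij[0] - 1, s_ij[1]]
--             ans += 1
--             continue
--         else:
--             s = phone[s_ij[0] + 1][s_ij[1]]
--             s_ij = [s_ij[0] + 1, s_ij[1]]
--             ans += 1
--             continue
--
--     return ans
-- ===== SOURCE B (Python) =====
-- POS = {'*': (3, 0), '#': (3, 2), 0: (3, 1),
--        1: (0, 0), 2: (0, 1), 3: (0, 2),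
--        4: (1, 0), 5: (1, 1), 6: (1, 2),
--        7: (2, 0), 8: (2, 1), 9: (2, 2)}
--
-- def solution(numbers, hand):
--     left, right = '*', '#'
--     out = []
--     for num in numbers:
--         if num in (1, 4, 7):
--             side = 'L'
--         elif num in (3, 6, 9):
--             side = 'R'
--         elif num in (2, 5, 8, 0):
--             tr, tc = POS[num]
--             lr, lc = POS[left]
--             rr, rc = POS[right]
--             dl = abs(lr - tr) + abs(lc - tc)
--             dr = abs(rr - tr) + abs(rc - tc)
--             if dl < dr:
--                 side = 'L'
--             elif dr < dl:
--                 side = 'R'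
--             else:
--                 side = 'L' if hand == 'left' else 'R'
--         else:
--             continue
--         if side == 'L':
--             left = num
--         else:
--             right = num
--         out.append(side)
--     return ''.join(out)
-- ===== Notes on version B (the rewrite author's own statement) =====
-- stated objective: simpler
-- what changed: B replaces A's iterative cell-by-cell how_long walker (nested coordinate search plus a multi-branch step-by-step while loop) with a closed-form Manhattan distance over a key->(row,col) coordinate dict, and folds A's six duplicated branch bodies into one side choice plus a single shared update.
import Mathlib
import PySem

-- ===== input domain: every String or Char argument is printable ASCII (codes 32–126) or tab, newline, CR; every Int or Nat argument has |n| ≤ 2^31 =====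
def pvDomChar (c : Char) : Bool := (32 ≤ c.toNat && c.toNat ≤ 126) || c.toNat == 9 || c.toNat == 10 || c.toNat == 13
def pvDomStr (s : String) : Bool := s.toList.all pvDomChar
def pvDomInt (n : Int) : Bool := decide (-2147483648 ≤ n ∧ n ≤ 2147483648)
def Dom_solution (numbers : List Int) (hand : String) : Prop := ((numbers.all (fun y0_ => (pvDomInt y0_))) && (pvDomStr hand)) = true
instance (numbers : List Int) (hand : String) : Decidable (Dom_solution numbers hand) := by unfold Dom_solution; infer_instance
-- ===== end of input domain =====

-- B replaces A's iterative cell-by-cell `how_long` walk by a closed-form Manhattan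
-- distance over a key→(row,col) coordinate table (objective: simpler).

-- A key on the phone pad: a digit (Python int) or the characters '*' / '#'.
inductive Key
  | star : Key
  | hash : Key
  | num : Int → Key
deriving DecidableEq, Repr

-- ===== PORT A =====

-- phone = [[1,2,3],[4,5,6],[7,8,9],['*',0,'#']]
def phoneA : List (List Key) :=
  [[Key.num 1, Key.num 2, Key.num 3],
   [Key.num 4, Key.num 5, Key.num 6],
   [Key.num 7, Key.num 8, Key.num 9],
   [Key.star, Key.num 0, Key.hash]]

-- phone[i][j]; indices are always in range on reachable states (default is a guard only)
def cellA (i j : Int) : Key :=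
  PySem.List.pyGetD (PySem.List.pyGetD phoneA i []) j (Key.num (-1))

-- the nested coordinate-finding loop with its `break`s (`if len(s_ij) == 2: break`)
def findIJ (s : Key) : List Int :=
  (List.range 4).foldl
    (fun acc i =>
      if acc.length == 2 then acc
      else (List.range 3).foldl
        (fun acc2 j =>
          if acc2.length == 2 then acc2
          else if cellA (i : Int) (j : Int) == s then acc2 ++ [(i : Int), (j : Int)]
          else acc2)
        acc)
    []

-- `s > g` (only ever reached with two ints in Python)
def keyGt : Key → Key → Bool
  | Key.num a, Key.num b => a > b
  | _, _ => false

-- inner `while s != 0:` walk downwards (g == 0 case); fuel only makes it total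
def walkDown (fuel : Nat) (s : Key) (si sj : Int) (ans : Int) : Int :=
  match fuel with
  | 0 => ans
  | f + 1 =>
    if s == Key.num 0 then ans
    else walkDown f (cellA (si + 1) sj) (si + 1) sj (ans + 1)

-- inner `while s != g:` walk upwards (s == 0 case)
def walkUp (fuel : Nat) (s : Key) (si sj : Int) (g : Key) (ans : Int) : Int :=
  match fuel with
  | 0 => ans
  | f + 1 =>
    if s == g then ans
    else walkUp f (cellA (si - 1) sj) (si - 1) sj g (ans + 1)

-- the main `while s != g:` loop of how_long; fuel 16 exceeds any reachable walk length
def howLoop (fuel : Nat) (s : Key) (si sj : Int) (g : Key) (ans : Int) : Int :=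
  match fuel with
  | 0 => ans
  | f + 1 =>
    if s == g then ans
    else if s == Key.num 1 || s == Key.num 4 || s == Key.num 7 || s == Key.star then
      howLoop f (cellA si (sj + 1)) si (sj + 1) g (ans + 1)
    else if s == Key.num 3 || s == Key.num 6 || s == Key.num 9 || s == Key.hash then
      howLoop f (cellA si (sj - 1)) si (sj - 1) g (ans + 1)
    else if g == Key.num 0 then walkDown f s si sj ans
    else if s == Key.num 0 then walkUp f s si sj g ans
    else if keyGt s g then howLoop f (cellA (si - 1) sj) (si - 1) sj g (ans + 1)
    else howLoop f (cellA (si + 1) sj) (si + 1) sj g (ans + 1)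

def how_long (s g : Key) : Int :=
  let sij := findIJ s
  howLoop 16 s (PySem.List.pyGetD sij 0 0) (PySem.List.pyGetD sij 1 0) g 0

-- body of A's for-loop: state = (answer, cur[0], cur[1])
def stepA (hand : String) (st : String × Key × Key) (num : Int) : String × Key × Key :=
  let ans := st.1
  let cl := st.2.1
  let cr := st.2.2
  if num == 1 || num == 4 || num == 7 then (ans ++ "L", Key.num num, cr)
  else if num == 3 || num == 6 || num == 9 then (ans ++ "R", cl, Key.num num)
  else if num == 2 || num == 5 || num == 8 || num == 0 then
    let left_hand := how_long cl (Key.num num)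
    let right_hand := how_long cr (Key.num num)
    if left_hand == right_hand then
      if hand == "left" then (ans ++ "L", Key.num num, cr)
      else (ans ++ "R", cl, Key.num num)
    else if left_hand < right_hand then (ans ++ "L", Key.num num, cr)
    else (ans ++ "R", cl, Key.num num)
  else st

def solution (numbers : List Int) (hand : String) : String :=
  (numbers.foldl (stepA hand) ("", Key.star, Key.hash)).1

-- ===== PORT B =====

-- POS: key → (row, col) on the 4×3 grid (a Python dict constant)
def POS : PySem.Dict Key (Int × Int) :=
  PySem.Dict.ofList
  [(Key.star, (3, 0)), (Key.hash, (3, 2)), (Key.num 0, (3, 1)),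
   (Key.num 1, (0, 0)), (Key.num 2, (0, 1)), (Key.num 3, (0, 2)),
   (Key.num 4, (1, 0)), (Key.num 5, (1, 1)), (Key.num 6, (1, 2)),
   (Key.num 7, (2, 0)), (Key.num 8, (2, 1)), (Key.num 9, (2, 2))]

-- body of B's for-loop: choose a side (none = `continue`), then one shared update
def stepB (hand : String) (st : List String × Key × Key) (num : Int) : List String × Key × Key :=
  let out := st.1
  let l := st.2.1
  let r := st.2.2
  let side? : Option String :=
    if num == 1 || num == 4 || num == 7 then some "L"
    else if num == 3 || num == 6 || num == 9 then some "R"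
    else if num == 2 || num == 5 || num == 8 || num == 0 then
      let t := PySem.Dict.getD POS (Key.num num) (0, 0)
      let lp := PySem.Dict.getD POS l (0, 0)
      let rp := PySem.Dict.getD POS r (0, 0)
      let dl : Int := ((lp.1 - t.1).natAbs + (lp.2 - t.2).natAbs : Nat)
      let dr : Int := ((rp.1 - t.1).natAbs + (rp.2 - t.2).natAbs : Nat)
      if dl < dr then some "L"
      else if dr < dl then some "R"
      else some (if hand == "left" then "L" else "R")
    else none
  match side? with
  | none => st
  | some side =>
    if side == "L" then (out ++ [side], Key.num num, r)
    else (out ++ [side], l, Key.num num)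

def solution_alt (numbers : List Int) (hand : String) : String :=
  String.join (numbers.foldl (stepB hand) ([], Key.star, Key.hash)).1

-- ===== PRECONDITION & SPEC =====
def Spec_solution (numbers : List Int) (hand : String) (out : String) : Prop := out = solution_alt numbers hand
instance (numbers : List Int) (hand : String) (out : String) : Decidable (Spec_solution numbers hand out) := by unfold Spec_solution; infer_instance

-- ===== CLAIM (what is proved, stated in full; the proofs are below) =====
def Claim_equal_solution : Prop := ∀ (numbers : List Int) (hand : String), Dom_solution numbers hand → Spec_solution numbers hand (solution numbers hand)

-- ===== LEMMAS AND PROOFS =====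

-- keys the left (resp. right) thumb can ever rest on
def LKeys : List Key := [Key.star, Key.num 1, Key.num 4, Key.num 7, Key.num 2, Key.num 5, Key.num 8, Key.num 0]
def RKeys : List Key := [Key.hash, Key.num 3, Key.num 6, Key.num 9, Key.num 2, Key.num 5, Key.num 8, Key.num 0]

-- A's walked distance equals B's Manhattan distance on every reachable (position, target) pair
theorem howLong_eq_dist :
    ∀ c ∈ LKeys ++ RKeys, ∀ n ∈ ([2, 5, 8, 0] : List Int),
      how_long c (Key.num n) =
        (((PySem.Dict.getD POS c (0, 0)).1 - (PySem.Dict.getD POS (Key.num n) (0, 0)).1).natAbs +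
         ((PySem.Dict.getD POS c (0, 0)).2 - (PySem.Dict.getD POS (Key.num n) (0, 0)).2).natAbs : Nat) := by
  decide

theorem join_append_singleton (l : List String) (s : String) :
    String.join (l ++ [s]) = String.join l ++ s := by
  simp [String.join, List.foldl_append]

theorem loop_eq (hand : String) :
    ∀ (ns : List Int) (ans : String) (out : List String) (cl cr : Key),
      cl ∈ LKeys → cr ∈ RKeys → ans = String.join out →
      (ns.foldl (stepA hand) (ans, cl, cr)).1 =
        String.join (ns.foldl (stepB hand) (out, cl, cr)).1 := by
  intro ns
  induction ns with
  | nil => intro ans out cl cr _ _ h; simpa using h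
  | cons n ns ih =>
    intro ans out cl cr hcl hcr hjoin
    by_cases hL : n = 1 ∨ n = 4 ∨ n = 7
    · have hA : (stepA hand (ans, cl, cr) n) = (ans ++ "L", Key.num n, cr) := by
        rcases hL with rfl | rfl | rfl <;> simp [stepA]
      have hB : (stepB hand (out, cl, cr) n) = (out ++ ["L"], Key.num n, cr) := by
        rcases hL with rfl | rfl | rfl <;> simp [stepB]
      rw [List.foldl_cons, List.foldl_cons, hA, hB]
      refine ih _ _ _ _ ?_ hcr (by rw [join_append_singleton, hjoin])
      rcases hL with rfl | rfl | rfl <;> decide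
    · by_cases hR : n = 3 ∨ n = 6 ∨ n = 9
      · have hA : (stepA hand (ans, cl, cr) n) = (ans ++ "R", cl, Key.num n) := by
          rcases hR with rfl | rfl | rfl <;> simp [stepA]
        have hB : (stepB hand (out, cl, cr) n) = (out ++ ["R"], cl, Key.num n) := by
          rcases hR with rfl | rfl | rfl <;> simp [stepB]
        rw [List.foldl_cons, List.foldl_cons, hA, hB]
        refine ih _ _ _ _ hcl ?_ (by rw [join_append_singleton, hjoin])
        rcases hR with rfl | rfl | rfl <;> decide
      · by_cases hM : n = 2 ∨ n = 5 ∨ n = 8 ∨ n = 0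
        · have hn : n ∈ ([2, 5, 8, 0] : List Int) := by
            rcases hM with rfl | rfl | rfl | rfl <;> decide
          have hdl := howLong_eq_dist cl (by simp [hcl]) n hn
          have hdr := howLong_eq_dist cr (by simp [hcr]) n hn
          have hmemL : Key.num n ∈ LKeys := by
            rcases hM with rfl | rfl | rfl | rfl <;> decide
          have hmemR : Key.num n ∈ RKeys := by
            rcases hM with rfl | rfl | rfl | rfl <;> decide
          have hcondA1 : (n == 1 || n == 4 || n == 7) = false := by simp; omega
          have hcondA2 : (n == 3 || n == 6 || n == 9) = false := by simp; omega
          have hcondA3 : (n == 2 || n == 5 || n == 8 || n == 0) = true := by simp; omega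
          rw [List.foldl_cons, List.foldl_cons]
          simp only [stepA, stepB, hcondA1, hcondA2, hcondA3, Bool.false_eq_true, if_false,
            if_true, hdl, hdr, beq_iff_eq]
          set t := PySem.Dict.getD POS (Key.num n) (0, 0) with ht
          set lp := PySem.Dict.getD POS cl (0, 0) with hlp
          set rp := PySem.Dict.getD POS cr (0, 0) with hrp
          set dl : Int := (((lp.1 - t.1).natAbs + (lp.2 - t.2).natAbs : Nat) : Int) with hdl'
          set dr : Int := (((rp.1 - t.1).natAbs + (rp.2 - t.2).natAbs : Nat) : Int) with hdr'
          rcases lt_trichotomy dl dr with h | h | h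
          · rw [if_neg (by omega : ¬ dl = dr), if_pos h, if_pos h]
            exact ih _ _ _ _ hmemL hcr (by rw [join_append_singleton, hjoin])
          · rw [if_pos h, if_neg (by omega : ¬ dl < dr), if_neg (by omega : ¬ dr < dl)]
            by_cases hh : hand = "left"
            · rw [if_pos hh, if_pos hh]
              exact ih _ _ _ _ hmemL hcr (by rw [join_append_singleton, hjoin])
            · rw [if_neg hh, if_neg hh]
              exact ih _ _ _ _ hcl hmemR (by rw [join_append_singleton, hjoin])
          · rw [if_neg (by omega : ¬ dl = dr), if_neg (by omega : ¬ dl < dr),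
               if_neg (by omega : ¬ dl < dr), if_pos h]
            exact ih _ _ _ _ hcl hmemR (by rw [join_append_singleton, hjoin])
        · have hA : (stepA hand (ans, cl, cr) n) = (ans, cl, cr) := by
            simp only [stepA]
            rw [if_neg (by simp; omega), if_neg (by simp; omega), if_neg (by simp; omega)]
          have hB : (stepB hand (out, cl, cr) n) = (out, cl, cr) := by
            simp only [stepB]
            rw [if_neg (by simp; omega), if_neg (by simp; omega), if_neg (by simp; omega)]
          rw [List.foldl_cons, List.foldl_cons, hA, hB]
          exact ih _ _ _ _ hcl hcr hjoin

-- ===== VERDICT (by name: the statement is the Claim_ definition above) =====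
theorem solution_spec : Claim_equal_solution := by
  intro numbers hand _
  show solution numbers hand = solution_alt numbers hand
  unfold solution solution_alt
  exact loop_eq hand numbers "" [] Key.star Key.hash (by decide) (by decide) (by simp [String.join])
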